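-- pv_equiv track=rewrite | github.com/igorvanloo/Project-Euler-Explained | Finished Problems/pe00234 - Semidivisible numbers.py | sumseq
-- ===== SOURCE A (Python) =====
-- def sumseq(ups, lps, limit):
--     total = 0
--     for x in range(lps*lps + lps, min(ups*ups, limit + 1), lps):
--         total += x
--     for x in range(ups*ups, lps*lps, -ups):
--         if x < min(ups*ups, limit + 1):
--             total += x
--     for x in range(ups*lps, min(ups*ups, limit + 1), lps*ups):
--         total -= 2*x
--     return total
-- ===== SOURCE B (Python) =====
-- def sumseq(ups, lps, limit):
--     # Closed-form arithmetic-series sums instead of A's three Python loops.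
--     m = min(ups * ups, limit + 1)
--
--     def rsum(a, b, s):
--         # sum(range(a, b, s)) in closed form (s != 0)
--         if s > 0:
--             n = (b - a + s - 1) // s if a < b else 0
--         else:
--             n = (a - b - s - 1) // (-s) if b < a else 0
--         return n * (2 * a + s * (n - 1)) // 2 if n > 0 else 0
--
--     def fsum(a, b, s, bound):
--         # sum of x in range(a, b, s) with x < bound, in closed form (s != 0)
--         if s > 0:
--             n = (b - a + s - 1) // s if a < b else 0
--             hi = min(n, (bound - a + s - 1) // s) if a < bound else 0
--             lo = 0
--         else:
--             n = (a - b - s - 1) // (-s) if b < a else 0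
--             lo = max(0, (a - bound) // (-s) + 1)
--             hi = n
--         if lo >= hi:
--             return 0
--         cnt = hi - lo
--         first = a + lo * s
--         return cnt * (2 * first + s * (cnt - 1)) // 2
--
--     total = rsum(lps * lps + lps, m, lps)
--     total += fsum(ups * ups, lps * lps, -ups, m)
--     total -= 2 * rsum(ups * lps, m, lps * ups)
--     return total
-- ===== Notes on version B (the rewrite author's own statement) =====
-- stated objective: faster
-- what changed: A iterates over three Python ranges summing term by term; B computes each loop's contribution with the closed-form arithmetic-series formula n*(2*first + step*(n-1))//2 (the filtered second loop via closed-form index bounds), doing O(1) arithmetic instead of iterating.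
import Mathlib
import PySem

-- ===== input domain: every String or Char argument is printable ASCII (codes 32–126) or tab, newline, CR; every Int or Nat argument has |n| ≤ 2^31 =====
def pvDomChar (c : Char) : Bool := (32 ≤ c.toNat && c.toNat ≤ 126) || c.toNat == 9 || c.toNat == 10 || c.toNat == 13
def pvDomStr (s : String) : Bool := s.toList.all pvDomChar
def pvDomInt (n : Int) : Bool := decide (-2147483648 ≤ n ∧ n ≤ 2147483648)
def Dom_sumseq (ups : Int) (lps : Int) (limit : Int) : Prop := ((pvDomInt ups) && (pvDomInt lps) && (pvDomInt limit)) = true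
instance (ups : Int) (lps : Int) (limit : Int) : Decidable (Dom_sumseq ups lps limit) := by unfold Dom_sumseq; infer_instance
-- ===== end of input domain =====

-- B replaces A's three Python loops by closed-form arithmetic-series sums (no iteration).

-- ===== PORT A =====
-- literal transliteration: three for-loops over range(...), accumulating into total
def sumseq (ups : Int) (lps : Int) (limit : Int) : Int :=
  let t1 := (PySem.List.pyRange (lps*lps + lps) (min (ups*ups) (limit + 1)) lps).foldl
              (fun total x => total + x) 0
  let t2 := (PySem.List.pyRange (ups*ups) (lps*lps) (-ups)).foldl
              (fun total x => if x < min (ups*ups) (limit + 1) then total + x else total) t1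
  (PySem.List.pyRange (ups*lps) (min (ups*ups) (limit + 1)) (lps*ups)).foldl
              (fun total x => total - 2*x) t2

-- ===== PORT B =====
-- helper rsum of Source B: sum(range(a, b, s)) in closed form
def rsumB (a : Int) (b : Int) (s : Int) : Int :=
  let n := if 0 < s then (if a < b then PySem.Int.floordiv (b - a + s - 1) s else 0)
           else (if b < a then PySem.Int.floordiv (a - b - s - 1) (-s) else 0)
  if 0 < n then PySem.Int.floordiv (n * (2*a + s*(n - 1))) 2 else 0

-- helper fsum of Source B: sum of x in range(a, b, s) with x < bound, in closed form
def fsumB (a : Int) (b : Int) (s : Int) (bound : Int) : Int :=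
  let p :=
    if 0 < s then
      let n := if a < b then PySem.Int.floordiv (b - a + s - 1) s else 0
      let hi := if a < bound then min n (PySem.Int.floordiv (bound - a + s - 1) s) else 0
      ((0 : Int), hi)
    else
      let n := if b < a then PySem.Int.floordiv (a - b - s - 1) (-s) else 0
      let lo := max 0 (PySem.Int.floordiv (a - bound) (-s) + 1)
      (lo, n)
  let lo := p.1
  let hi := p.2
  if lo ≥ hi then 0
  else
    let cnt := hi - lo
    let first := a + lo * s
    PySem.Int.floordiv (cnt * (2*first + s*(cnt - 1))) 2

def sumseq_alt (ups : Int) (lps : Int) (limit : Int) : Int :=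
  let m := min (ups*ups) (limit + 1)
  let total := rsumB (lps*lps + lps) m lps
  let total := total + fsumB (ups*ups) (lps*lps) (-ups) m
  total - 2 * rsumB (ups*lps) m (lps*ups)

-- ===== PRECONDITION & SPEC =====
-- Pre_ excludes exactly the inputs where Python A raises ValueError: a zero range step
-- (lps = 0 makes loop 1's step zero, ups = 0 makes loop 2's step zero).
def Pre_sumseq (ups : Int) (lps : Int) (limit : Int) : Prop := ups ≠ 0 ∧ lps ≠ 0
instance (ups : Int) (lps : Int) (limit : Int) : Decidable (Pre_sumseq ups lps limit) := by
  unfold Pre_sumseq; infer_instance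
def pvWitness_sumseq : Int × Int × Int := (3, 2, 100)

def Spec_sumseq (ups : Int) (lps : Int) (limit : Int) (out : Int) : Prop := out = sumseq_alt ups lps limit
instance (ups : Int) (lps : Int) (limit : Int) (out : Int) : Decidable (Spec_sumseq ups lps limit out) := by unfold Spec_sumseq; infer_instance

-- ===== CLAIM (what is proved, stated in full; the proofs are below) =====
def Claim_equal_sumseq : Prop := ∀ (ups : Int) (lps : Int) (limit : Int), Dom_sumseq ups lps limit → Pre_sumseq ups lps limit → Spec_sumseq ups lps limit (sumseq ups lps limit)

-- ===== LEMMAS AND PROOFS =====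

theorem floordiv_pos_den (a : Int) {s : Int} (hs : 0 < s) : PySem.Int.floordiv a s = a / s := by
  simp only [PySem.Int.floordiv, Int.fdiv_eq_ediv, if_pos (Or.inl (le_of_lt hs))]; ring

theorem half_double (x : Int) : PySem.Int.floordiv (2*x) 2 = x := by
  simp [PySem.Int.floordiv, Int.fdiv_eq_ediv]

-- twice the sum of an affine progression, in closed form
theorem sum_affine (a s : Int) (n : Nat) :
    2 * ((List.range n).map (fun (k : Nat) => a + s*(k:Int))).sum = n * (2*a + s*((n:Int) - 1)) := by
  induction n with
  | zero => simp
  | succ n ih =>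
    rw [List.range_succ, List.map_append, List.sum_append]
    simp only [List.map_cons, List.map_nil, List.sum_cons, List.sum_nil, add_zero]
    push_cast
    push_cast at ih
    nlinarith [ih]

-- the closed form Source B divides by 2 equals the sum it replaces
theorem closed_sum (a s : Int) (n : Nat) :
    PySem.Int.floordiv ((n : Int) * (2*a + s*((n:Int) - 1))) 2
      = ((List.range n).map (fun (k : Nat) => a + s*(k:Int))).sum := by
  rw [← sum_affine, half_double]

-- segment version: sum of the affine progression over [lo, n)
theorem closed_sum_seg (a s : Int) (lo n : Nat) :
    PySem.Int.floordiv (((n:Int) - (lo:Int)) * (2*(a + (lo:Int)*s) + s*(((n:Int) - (lo:Int)) - 1))) 2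
      = ((List.range n).map (fun (k:Nat) => a + s*(k:Int))).sum
        - ((List.range lo).map (fun (k:Nat) => a + s*(k:Int))).sum := by
  have h2 : ((n:Int) - (lo:Int)) * (2*(a + (lo:Int)*s) + s*(((n:Int) - (lo:Int)) - 1))
      = 2 * (((List.range n).map (fun (k:Nat) => a + s*(k:Int))).sum
             - ((List.range lo).map (fun (k:Nat) => a + s*(k:Int))).sum) := by
    have hA := sum_affine a s n
    have hB := sum_affine a s lo
    linear_combination hB - hA
  rw [h2, half_double]

-- pyRange with a negative step, in List.range form
theorem pyRange_of_neg (a b : Int) {s : Int} (hs : s < 0) :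
    PySem.List.pyRange a b s =
      (List.range (if b < a then ((a - b - s - 1) / (-s)).toNat else 0)).map
        (fun (k : Nat) => a + s*(k:Int)) := by
  simp only [PySem.List.pyRange, if_neg (by omega : ¬ s = 0), if_neg (by omega : ¬ 0 < s)]
  have : a - b + -s - 1 = a - b - s - 1 := by ring
  rw [this]

-- prefix filter: summing (if k < K) over range n is summing over range (min n K.toNat)
theorem sum_ite_lt (f : Nat → Int) (K : Int) (n : Nat) :
    ((List.range n).map (fun (k : Nat) => if (k:Int) < K then f k else 0)).sum
      = ((List.range (min n K.toNat)).map f).sum := by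
  induction n with
  | zero => simp
  | succ n ih =>
    rw [List.range_succ, List.map_append, List.sum_append, ih]
    by_cases h : (n:Int) < K
    · have h1 : min n K.toNat = n := by omega
      have h2 : min (n+1) K.toNat = n + 1 := by omega
      rw [h1, h2, List.range_succ, List.map_append, List.sum_append]
      simp [h]
    · have h2 : min (n+1) K.toNat = min n K.toNat := by omega
      rw [h2]
      simp [h]

-- suffix filter: summing (if K ≤ k) over range n
theorem sum_ite_ge (f : Nat → Int) (K : Int) (n : Nat) :
    ((List.range n).map (fun (k : Nat) => if K ≤ (k:Int) then f k else 0)).sum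
      = ((List.range n).map f).sum - ((List.range (min n K.toNat)).map f).sum := by
  induction n with
  | zero => simp
  | succ n ih =>
    rw [List.range_succ, List.map_append, List.sum_append, ih]
    by_cases h : K ≤ (n:Int)
    · have h2 : min (n+1) K.toNat = min n K.toNat := by omega
      rw [h2]
      simp [h]
      ring
    · have h1 : min n K.toNat = n := by omega
      have h2 : min (n+1) K.toNat = n + 1 := by omega
      rw [h1, h2, List.range_succ]
      simp only [List.map_append, List.sum_append, List.map_cons, List.map_nil,
        List.sum_cons, List.sum_nil]
      simp [h]

-- the two threshold conditions of Source B, as inequalities on the index k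
theorem lt_ceil {s : Int} (hpos : 0 < s) (a bound k : Int) :
    (k < (bound - a + s - 1) / s) ↔ a + s*k < bound := by
  have h1 : bound - a + s - 1 = (bound - a - 1) + 1*s := by ring
  rw [h1, Int.add_mul_ediv_right _ _ (by omega : s ≠ 0), Int.lt_add_one_iff,
      Int.le_ediv_iff_mul_le hpos]
  constructor <;> intro h <;> nlinarith

theorem le_k_iff {s : Int} (hneg : s < 0) (a bound k : Int) :
    ((a - bound) / (-s) + 1 ≤ k) ↔ a + s*k < bound := by
  rw [Int.add_one_le_iff, Int.ediv_lt_iff_lt_mul (by omega : (0:Int) < -s)]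
  constructor <;> intro h <;> nlinarith

theorem rsumB_eq_sum (a b s : Int) (hs : s ≠ 0) :
    rsumB a b s = (PySem.List.pyRange a b s).sum := by
  unfold rsumB
  by_cases hpos : 0 < s
  · rw [PySem.List.pyRange_of_pos a b hpos]
    by_cases hab : a < b
    · have hq : PySem.Int.floordiv (b - a + s - 1) s = (b - a + s - 1) / s := floordiv_pos_den _ hpos
      have hq0 : 0 < (b - a + s - 1) / s := by
        have h1 : (1:Int) ≤ (b - a + s - 1) / s := by
          rw [Int.le_ediv_iff_mul_le hpos]; omega
        omega
      simp only [if_pos hpos, if_pos hab, hq, if_pos hq0]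
      have hc := closed_sum a s ((b - a + s - 1) / s).toNat
      rw [Int.toNat_of_nonneg (le_of_lt hq0)] at hc
      rw [hc]
    · simp [hpos, hab]
  · have hneg : s < 0 := by omega
    rw [pyRange_of_neg a b hneg]
    by_cases hba : b < a
    · have hq : PySem.Int.floordiv (a - b - s - 1) (-s) = (a - b - s - 1) / (-s) :=
        floordiv_pos_den _ (by omega)
      have hq0 : 0 < (a - b - s - 1) / (-s) := by
        have h1 : (1:Int) ≤ (a - b - s - 1) / (-s) := by
          rw [Int.le_ediv_iff_mul_le (by omega : (0:Int) < -s)]; omega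
        omega
      simp only [if_neg hpos, if_pos hba, hq, if_pos hq0]
      have hc := closed_sum a s ((a - b - s - 1) / (-s)).toNat
      rw [Int.toNat_of_nonneg (le_of_lt hq0)] at hc
      rw [hc]
    · simp [hpos, hba]

theorem fsumB_eq_sum (a b s bound : Int) (hs : s ≠ 0) :
    fsumB a b s bound
      = ((PySem.List.pyRange a b s).map (fun x => if x < bound then x else 0)).sum := by
  by_cases hpos : 0 < s
  · have hK : PySem.Int.floordiv (bound - a + s - 1) s = (bound - a + s - 1) / s :=
      floordiv_pos_den _ hpos
    have hn : PySem.Int.floordiv (b - a + s - 1) s = (b - a + s - 1) / s :=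
      floordiv_pos_den _ hpos
    rw [PySem.List.pyRange_of_pos a b hpos, List.map_map]
    have hcomp : ((fun x => if x < bound then x else 0) ∘ (fun (k:Nat) => a + s*(k:Int)))
        = fun (k:Nat) => if ((k:Int) < (bound - a + s - 1) / s) then (a + s*(k:Int)) else 0 := by
      funext k
      simp only [Function.comp_apply]
      exact if_congr (Iff.symm (lt_ceil hpos a bound (k:Int))) rfl rfl
    rw [hcomp, sum_ite_lt]
    unfold fsumB
    simp only [if_pos hpos, hK, hn]
    by_cases hab : a < b
    · have hn1 : (1:Int) ≤ (b - a + s - 1) / s := by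
        rw [Int.le_ediv_iff_mul_le hpos]; omega
      by_cases habd : a < bound
      · have hK1 : (1:Int) ≤ (bound - a + s - 1) / s := by
          rw [Int.le_ediv_iff_mul_le hpos]; omega
        simp only [if_pos hab, if_pos habd]
        have hhi : ¬ ((0:Int) ≥ min ((b - a + s - 1) / s) ((bound - a + s - 1) / s)) := by omega
        rw [if_neg hhi]
        have hmin : min ((b - a + s - 1) / s) ((bound - a + s - 1) / s)
            = ((min ((b - a + s - 1) / s).toNat ((bound - a + s - 1) / s).toNat : Nat) : Int) := by
          omega
        simp only [sub_zero, zero_mul, add_zero, hmin]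
        exact closed_sum a s _
      · have hK0 : (bound - a + s - 1) / s < 1 := by
          rw [Int.ediv_lt_iff_lt_mul hpos]; omega
        simp only [if_pos hab, if_neg habd]
        have : ((bound - a + s - 1) / s).toNat = 0 := by omega
        rw [this]
        simp
    · simp only [if_neg hab]
      have hc0 : (min (0:Nat) ((bound - a + s - 1) / s).toNat) = 0 := by omega
      by_cases habd : a < bound
      · have hK1 : (1:Int) ≤ (bound - a + s - 1) / s := by
          rw [Int.le_ediv_iff_mul_le hpos]; omega
        simp only [if_pos habd]
        have : min (0:Int) ((bound - a + s - 1) / s) = 0 := by omega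
        rw [this]
        simp
      · simp only [if_neg habd]
        simp
  · have hneg : s < 0 := by omega
    have hL : PySem.Int.floordiv (a - bound) (-s) = (a - bound) / (-s) :=
      floordiv_pos_den _ (by omega)
    have hn : PySem.Int.floordiv (a - b - s - 1) (-s) = (a - b - s - 1) / (-s) :=
      floordiv_pos_den _ (by omega)
    rw [pyRange_of_neg a b hneg, List.map_map]
    have hcomp : ((fun x => if x < bound then x else 0) ∘ (fun (k:Nat) => a + s*(k:Int)))
        = fun (k:Nat) => if ((a - bound) / (-s) + 1 ≤ (k:Int)) then (a + s*(k:Int)) else 0 := by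
      funext k
      simp only [Function.comp_apply]
      exact if_congr (Iff.symm (le_k_iff hneg a bound (k:Int))) rfl rfl
    rw [hcomp, sum_ite_ge]
    unfold fsumB
    simp only [if_neg hpos, hL, hn]
    by_cases hba : b < a
    · have hn1 : (1:Int) ≤ (a - b - s - 1) / (-s) := by
        rw [Int.le_ediv_iff_mul_le (by omega : (0:Int) < -s)]; omega
      simp only [if_pos hba]
      by_cases hge : max 0 ((a - bound) / (-s) + 1) ≥ (a - b - s - 1) / (-s)
      · rw [if_pos hge]
        have hmin : min ((a - b - s - 1) / (-s)).toNat ((a - bound) / (-s) + 1).toNat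
            = ((a - b - s - 1) / (-s)).toNat := by omega
        rw [hmin, sub_self]
      · rw [if_neg hge]
        have hlo0 : (0:Int) ≤ max 0 ((a - bound) / (-s) + 1) := by omega
        have hmin : min ((a - b - s - 1) / (-s)).toNat ((a - bound) / (-s) + 1).toNat
            = (max 0 ((a - bound) / (-s) + 1)).toNat := by omega
        rw [hmin]
        have hc := closed_sum_seg a s (max 0 ((a - bound) / (-s) + 1)).toNat
                     ((a - b - s - 1) / (-s)).toNat
        rw [Int.toNat_of_nonneg hlo0] at hc
        rw [Int.toNat_of_nonneg (by omega : (0:Int) ≤ (a - b - s - 1) / (-s))] at hc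
        exact hc
    · simp only [if_neg hba]
      have hge : max 0 ((a - bound) / (-s) + 1) ≥ 0 := by omega
      rw [if_pos hge]
      simp

theorem sum_map_neg_two (l : List Int) : (l.map (fun x => (-2:Int)*x)).sum = (-2) * l.sum := by
  induction l with
  | nil => simp
  | cons h t ih => simp only [List.map_cons, List.sum_cons, ih]; ring

-- ===== VERDICT (by name: the statement is the Claim_ definition above) =====
theorem sumseq_spec : Claim_equal_sumseq := by
  intro ups lps limit _ hpre
  obtain ⟨hu, hl⟩ := hpre
  unfold Spec_sumseq sumseq sumseq_alt
  dsimp only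
  have e2 : (fun (total x : Int) => if x < min (ups*ups) (limit+1) then total + x else total)
      = fun (total x : Int) => total + (if x < min (ups*ups) (limit+1) then x else 0) := by
    funext t x; split <;> simp
  have e3 : (fun (total x : Int) => total - 2*x) = fun (total x : Int) => total + (-2)*x := by
    funext t x; ring
  rw [e2, e3]
  rw [PySem.List.foldl_add _ (fun x => x) 0]
  rw [PySem.List.foldl_add _ (fun x => if x < min (ups*ups) (limit+1) then x else 0)]
  rw [PySem.List.foldl_add _ (fun x => (-2)*x)]
  rw [rsumB_eq_sum _ _ _ hl, rsumB_eq_sum _ _ _ (mul_ne_zero hl hu),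
      fsumB_eq_sum _ _ _ _ (neg_ne_zero.mpr hu)]
  rw [sum_map_neg_two]
  simp only [List.map_id']
  ring
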